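-- pv_equiv track=rewrite | github.com/Momo43-ui/ApplicationTrack | backend/chatbot_service.py | _analyze_candidatures
-- ===== SOURCE A (Python) =====
-- from typing import Dict, List, Optional
--
-- def _analyze_candidatures(candidatures: List[Dict]) -> Dict:
--     """Analyse rapide des candidatures pour les stats"""
--     stats = {
--         'total': len(candidatures),
--         'en_attente': 0,
--         'entretiens': 0,
--         'refuses': 0,
--         'acceptees': 0
--     }
--
--     for c in candidatures:
--         etat = c.get('etat', '')
--         if etat in ['en_attente', 'candidature_envoyee']:
--             stats['en_attente'] += 1
--         elif etat == 'entretien_passe':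
--             stats['entretiens'] += 1
--         elif etat == 'refuse':
--             stats['refuses'] += 1
--         elif etat == 'accepte':
--             stats['acceptees'] += 1
--
--     return stats
-- ===== SOURCE B (Python) =====
-- from typing import Dict, List, Optional
--
-- def _analyze_candidatures(candidatures: List[Dict]) -> Dict:
--     """Analyse rapide des candidatures pour les stats"""
--     etats = [c.get('etat', '') for c in candidatures]
--     return {
--         'total': len(etats),
--         'en_attente': etats.count('en_attente') + etats.count('candidature_envoyee'),
--         'entretiens': etats.count('entretien_passe'),
--         'refuses': etats.count('refuse'),
--         'acceptees': etats.count('accepte'),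
--     }
-- ===== Notes on version B (the rewrite author's own statement) =====
-- stated objective: simpler
-- what changed: Replaces A's single accumulator loop with if/elif branching over four mutable counters by a projection of the states followed by independent list.count passes, one per statistic; no loop state or branching remains.
import Mathlib
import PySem

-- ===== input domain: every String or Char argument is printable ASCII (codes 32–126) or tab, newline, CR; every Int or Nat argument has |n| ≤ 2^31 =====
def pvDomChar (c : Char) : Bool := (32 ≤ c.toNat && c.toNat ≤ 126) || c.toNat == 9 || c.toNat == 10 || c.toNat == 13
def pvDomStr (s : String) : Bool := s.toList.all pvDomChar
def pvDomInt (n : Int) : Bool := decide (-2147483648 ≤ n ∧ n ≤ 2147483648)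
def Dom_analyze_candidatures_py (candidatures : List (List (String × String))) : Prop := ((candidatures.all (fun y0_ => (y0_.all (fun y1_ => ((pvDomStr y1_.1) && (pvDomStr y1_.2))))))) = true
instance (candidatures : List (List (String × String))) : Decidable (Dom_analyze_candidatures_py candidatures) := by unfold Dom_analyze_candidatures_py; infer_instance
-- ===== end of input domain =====

-- B replaces A's branching accumulator loop by a projection of the states plus one
-- independent list.count pass per statistic (simpler; same cost). Equivalence on all inputs.

-- ===== PORT A =====
def analyze_candidatures_py (candidatures : List (List (String × String))) : List (String × Int) :=
  let stats : PySem.Dict String Int :=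
    PySem.Dict.mk [("total", PySem.List.len candidatures), ("en_attente", 0),
                   ("entretiens", 0), ("refuses", 0), ("acceptees", 0)]
  let stats := candidatures.foldl (fun st c =>
    let etat := (c.lookup "etat").getD ""
    if etat == "en_attente" || etat == "candidature_envoyee" then st.modify "en_attente" 0 (· + 1)
    else if etat == "entretien_passe" then st.modify "entretiens" 0 (· + 1)
    else if etat == "refuse" then st.modify "refuses" 0 (· + 1)
    else if etat == "accepte" then st.modify "acceptees" 0 (· + 1)
    else st) stats
  stats.items

-- ===== PORT B =====
def analyze_candidatures_py_alt (candidatures : List (List (String × String))) : List (String × Int) :=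
  let etats := candidatures.map (fun c => (c.lookup "etat").getD "")
  [("total", PySem.List.len etats),
   ("en_attente", PySem.List.count etats "en_attente" + PySem.List.count etats "candidature_envoyee"),
   ("entretiens", PySem.List.count etats "entretien_passe"),
   ("refuses", PySem.List.count etats "refuse"),
   ("acceptees", PySem.List.count etats "accepte")]

-- ===== PRECONDITION & SPEC =====
def Spec_analyze_candidatures_py (candidatures : List (List (String × String))) (out : List (String × Int)) : Prop := out = analyze_candidatures_py_alt candidatures
instance (candidatures : List (List (String × String))) (out : List (String × Int)) : Decidable (Spec_analyze_candidatures_py candidatures out) := by unfold Spec_analyze_candidatures_py; infer_instance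

-- ===== CLAIM (what is proved, stated in full; the proofs are below) =====
def Claim_equal_analyze_candidatures_py : Prop := ∀ (candidatures : List (List (String × String))), Dom_analyze_candidatures_py candidatures → Spec_analyze_candidatures_py candidatures (analyze_candidatures_py candidatures)

-- ===== LEMMAS AND PROOFS =====

-- the state value both programs read: c.get('etat', '')
def pvEtat (c : List (String × String)) : String := (c.lookup "etat").getD ""

theorem pvStepA (s : String) (t a e r ac : Int) :
    (if s == "en_attente" || s == "candidature_envoyee" then
        (PySem.Dict.mk [("total", t), ("en_attente", a), ("entretiens", e), ("refuses", r), ("acceptees", ac)]).modify "en_attente" 0 (· + 1)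
      else if s == "entretien_passe" then
        (PySem.Dict.mk [("total", t), ("en_attente", a), ("entretiens", e), ("refuses", r), ("acceptees", ac)]).modify "entretiens" 0 (· + 1)
      else if s == "refuse" then
        (PySem.Dict.mk [("total", t), ("en_attente", a), ("entretiens", e), ("refuses", r), ("acceptees", ac)]).modify "refuses" 0 (· + 1)
      else if s == "accepte" then
        (PySem.Dict.mk [("total", t), ("en_attente", a), ("entretiens", e), ("refuses", r), ("acceptees", ac)]).modify "acceptees" 0 (· + 1)
      else PySem.Dict.mk [("total", t), ("en_attente", a), ("entretiens", e), ("refuses", r), ("acceptees", ac)])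
    = PySem.Dict.mk [("total", t),
        ("en_attente", a + if s == "en_attente" || s == "candidature_envoyee" then 1 else 0),
        ("entretiens", e + if s == "entretien_passe" then 1 else 0),
        ("refuses", r + if s == "refuse" then 1 else 0),
        ("acceptees", ac + if s == "accepte" then 1 else 0)] := by
  by_cases h1 : s = "en_attente"
  · subst h1; simp [PySem.Dict.modify, PySem.Dict.contains, PySem.Dict.getD, PySem.Dict.get?, PySem.Dict.insert]
  by_cases h1' : s = "candidature_envoyee"
  · subst h1'; simp [PySem.Dict.modify, PySem.Dict.contains, PySem.Dict.getD, PySem.Dict.get?, PySem.Dict.insert]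
  by_cases h2 : s = "entretien_passe"
  · subst h2; simp [PySem.Dict.modify, PySem.Dict.contains, PySem.Dict.getD, PySem.Dict.get?, PySem.Dict.insert]
  by_cases h3 : s = "refuse"
  · subst h3; simp [PySem.Dict.modify, PySem.Dict.contains, PySem.Dict.getD, PySem.Dict.get?, PySem.Dict.insert]
  by_cases h4 : s = "accepte"
  · subst h4; simp [PySem.Dict.modify, PySem.Dict.contains, PySem.Dict.getD, PySem.Dict.get?, PySem.Dict.insert]
  · simp [h1, h1', h2, h3, h4]

theorem pvLoopA (cs : List (List (String × String))) (t a e r ac : Int) :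
    cs.foldl (fun st c =>
      let etat := (c.lookup "etat").getD ""
      if etat == "en_attente" || etat == "candidature_envoyee" then st.modify "en_attente" 0 (· + 1)
      else if etat == "entretien_passe" then st.modify "entretiens" 0 (· + 1)
      else if etat == "refuse" then st.modify "refuses" 0 (· + 1)
      else if etat == "accepte" then st.modify "acceptees" 0 (· + 1)
      else st)
      (PySem.Dict.mk [("total", t), ("en_attente", a), ("entretiens", e), ("refuses", r), ("acceptees", ac)])
    = PySem.Dict.mk [("total", t),
        ("en_attente", a + ((cs.map pvEtat).countP (fun s => s == "en_attente" || s == "candidature_envoyee") : Int)),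
        ("entretiens", e + ((cs.map pvEtat).count "entretien_passe" : Int)),
        ("refuses", r + ((cs.map pvEtat).count "refuse" : Int)),
        ("acceptees", ac + ((cs.map pvEtat).count "accepte" : Int))] := by
  induction cs generalizing t a e r ac with
  | nil => simp
  | cons c cs ih =>
    simp only [List.foldl_cons, List.map_cons, List.countP_cons, List.count_cons]
    rw [pvStepA ((c.lookup "etat").getD "") t a e r ac, ih]
    simp only [pvEtat]
    push_cast
    ring_nf

-- the disjunctive countP of A's first branch splits into B's two counts
theorem pvCountPSplit (l : List String) :
    l.countP (fun s => s == "en_attente" || s == "candidature_envoyee")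
      = l.count "en_attente" + l.count "candidature_envoyee" := by
  induction l with
  | nil => simp
  | cons x xs ih =>
    by_cases h1 : x = "en_attente" <;> by_cases h2 : x = "candidature_envoyee" <;>
      simp_all <;> omega

-- ===== VERDICT (by name: the statement is the Claim_ definition above) =====
theorem analyze_candidatures_py_spec : Claim_equal_analyze_candidatures_py := by
  intro cs _
  unfold Spec_analyze_candidatures_py
  simp only [analyze_candidatures_py, analyze_candidatures_py_alt]
  rw [pvLoopA, pvCountPSplit]
  have hmap : List.map pvEtat cs = List.map (fun c => (List.lookup "etat" c).getD "") cs := rfl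
  simp [PySem.List.count_eq, PySem.List.len, hmap]
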